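-- pv_equiv track=rewrite | github.com/brianlo06/circuit-classifier | topology/circuit_classifier.py | _describe_alias_groups
-- ===== SOURCE A (Python) =====
-- from typing import Dict, List, Optional, Tuple
--
-- def _describe_alias_groups(assignment: Dict[str, str]) -> str:
--     """Create a human-readable description of the alias groups."""
--     groups: Dict[str, List[str]] = {}
--     for inp, rep in assignment.items():
--         groups.setdefault(rep, []).append(inp)
--     descriptions = []
--     for rep, members in sorted(groups.items()):
--         if len(members) > 1:
--             descriptions.append(f"{{{', '.join(sorted(members))}}}")
--         else:
--             descriptions.append(members[0])
--     return ", ".join(descriptions)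
-- ===== SOURCE B (Python) =====
-- def _describe_alias_groups(assignment):
--     """Create a human-readable description of the alias groups."""
--     pairs = sorted(assignment.items(), key=lambda kv: (kv[1], kv[0]))
--     parts = []
--     while pairs:
--         inp, rep = pairs[0]
--         members = [inp]
--         k = 1
--         while k < len(pairs) and pairs[k][1] == rep:
--             members.append(pairs[k][0])
--             k += 1
--         parts.append("{" + ", ".join(members) + "}" if len(members) > 1 else members[0])
--         pairs = pairs[k:]
--     return ", ".join(parts)
-- ===== Notes on version B (the rewrite author's own statement) =====
-- stated objective: alternative
-- what changed: Replaces the hash-group-then-sort two-phase shape (dict of rep -> members via setdefault, then sorting the items and each member list) by a sort-first single pass: sort the pairs once by (representative, input), then walk consecutive runs of equal representatives, whose members are already in sorted order. Pre_ only excludes association lists with duplicate keys, which do not denote a Python dict.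
import Mathlib
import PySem

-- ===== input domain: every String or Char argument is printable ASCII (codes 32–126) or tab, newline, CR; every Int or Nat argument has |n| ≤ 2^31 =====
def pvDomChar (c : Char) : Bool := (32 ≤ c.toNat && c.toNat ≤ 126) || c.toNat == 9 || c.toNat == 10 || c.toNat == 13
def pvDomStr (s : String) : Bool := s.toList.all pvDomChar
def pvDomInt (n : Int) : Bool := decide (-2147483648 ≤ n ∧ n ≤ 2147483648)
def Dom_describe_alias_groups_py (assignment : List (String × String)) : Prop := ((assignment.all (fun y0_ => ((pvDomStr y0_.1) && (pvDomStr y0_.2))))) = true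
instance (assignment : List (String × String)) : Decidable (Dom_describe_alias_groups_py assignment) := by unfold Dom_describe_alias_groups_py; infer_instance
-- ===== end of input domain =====

-- B replaces A's hash-group-then-sort shape by one sort by (rep, inp) followed by a single
-- pass over consecutive runs (objective: alternative decomposition, same asymptotic cost).

-- ===== PORT A =====
def describe_alias_groups_py (assignment : List (String × String)) : String :=
  -- groups.setdefault(rep, []).append(inp)  ==  groups[rep] = groups.get(rep, []) + [inp]
  let groups : PySem.Dict String (List String) :=
    assignment.foldl (fun g p => g.modify p.2 [] (fun ms => ms ++ [p.1])) PySem.Dict.empty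
  let descriptions : List String :=
    (PySem.List.sorted2 groups.items (fun rm => rm.1) (fun rm => rm.2)).foldl
      (fun ds rm =>
        ds ++ [if rm.2.length > 1
               then "{" ++ PySem.Str.join ", " (PySem.List.sorted rm.2 (fun m => m)) ++ "}"
               else (PySem.List.pyGet? rm.2 0).getD ""])  -- members[0]; group member lists are never empty
      []
  PySem.Str.join ", " descriptions

-- ===== PORT B =====
-- the outer 'while pairs:' loop of Source B: emit one description per run of equal representatives
def altRun : List (String × String) → List String
  | [] => []
  | (inp, rep) :: rest =>
    let members := inp :: (rest.takeWhile (fun q => q.2 == rep)).map (fun q => q.1)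
    (if members.length > 1
     then "{" ++ PySem.Str.join ", " members ++ "}"
     else (PySem.List.pyGet? members 0).getD "")
    :: altRun (rest.dropWhile (fun q => q.2 == rep))
termination_by l => l.length
decreasing_by
  simp only [List.length_cons]
  exact Nat.lt_succ_of_le (List.length_dropWhile_le _ _)

def describe_alias_groups_py_alt (assignment : List (String × String)) : String :=
  PySem.Str.join ", " (altRun (PySem.List.sorted2 assignment (fun kv => kv.2) (fun kv => kv.1)))

-- ===== PRECONDITION & SPEC =====
-- Pre_ excludes association lists with duplicate keys: such a list does not denote a Python dict
-- (dict(...) keeps only the last value per key), so the list-level ports cannot be compared there.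
def Pre_describe_alias_groups_py (assignment : List (String × String)) : Prop :=
  (assignment.map (fun p => p.1)).Nodup
instance (assignment : List (String × String)) : Decidable (Pre_describe_alias_groups_py assignment) := by unfold Pre_describe_alias_groups_py; infer_instance

def pvWitness_describe_alias_groups_py : (List (String × String)) := [("b", "r"), ("a", "r"), ("c", "s")]

def Spec_describe_alias_groups_py (assignment : List (String × String)) (out : String) : Prop := out = describe_alias_groups_py_alt assignment
instance (assignment : List (String × String)) (out : String) : Decidable (Spec_describe_alias_groups_py assignment out) := by unfold Spec_describe_alias_groups_py; infer_instance

-- ===== CLAIM (what is proved, stated in full; the proofs are below) =====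
def Claim_equal_describe_alias_groups_py : Prop := ∀ (assignment : List (String × String)), Dom_describe_alias_groups_py assignment → Pre_describe_alias_groups_py assignment → Spec_describe_alias_groups_py assignment (describe_alias_groups_py assignment)

-- ===== LEMMAS AND PROOFS =====

-- members of the group of representative r, in insertion order (what A's dict holds at r)
def pvMems (l : List (String × String)) (r : String) : List String :=
  (l.filter (fun p => p.2 == r)).map (fun p => p.1)

def pvSMems (l : List (String × String)) (r : String) : List String :=
  PySem.List.sorted (pvMems l r) (fun m => m)

-- the representatives, distinct and sorted
def pvSReps (l : List (String × String)) : List String :=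
  PySem.List.sorted (PySem.Set.ofList (l.map (fun p => p.2))) (fun x => x)

-- one group's description, from its (sorted) member list
def pvFmt (ms : List String) : String :=
  if ms.length > 1 then "{" ++ PySem.Str.join ", " ms ++ "}" else (PySem.List.pyGet? ms 0).getD ""

-- the common normal form both programs compute
def pvTarget (l : List (String × String)) : String :=
  PySem.Str.join ", " ((pvSReps l).map (fun r => pvFmt (pvSMems l r)))

-- Python's tuple sort, named: a strictly lex-increasing rearrangement IS the sorted2 result
-- (concrete types keep the port's LT/DecidableLT instances)
theorem pv_sorted2_pairs_eq_of (xs ys : List (String × List String))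
    (hp : ys.Perm xs)
    (hs : ys.Pairwise (fun a b => toLex (a.1, a.2) < toLex (b.1, b.2))) :
    PySem.List.sorted2 xs (fun rm => rm.1) (fun rm => rm.2) = ys := by
  have key := PySem.List.sorted_eq_of_perm_of_pairwise_lt (κ := Lex (String × List String))
      xs ys (fun rm => toLex (rm.1, rm.2)) hp hs
  rw [← key, PySem.List.sorted_eq_foldl_insertBy]
  have hpred : (fun (a b : String × List String) => decide (a.1 < b.1) || (!decide (b.1 < a.1) && decide (a.2 < b.2)))
      = (fun (a b : String × List String) => decide (toLex ((fun rm : String × List String => rm.1) a, (fun rm : String × List String => rm.2) a) < toLex ((fun rm : String × List String => rm.1) b, (fun rm : String × List String => rm.2) b))) := by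
    funext a b
    by_cases h1 : a.1 < b.1
    · simp [h1, Prod.Lex.lt_iff]
    · by_cases h2 : b.1 < a.1
      · have hne : ¬ a.1 = b.1 := fun h => absurd (h ▸ h2) (lt_irrefl _)
        simp [h1, h2, Prod.Lex.lt_iff, hne]
      · have heq : a.1 = b.1 := le_antisymm (not_lt.1 h2) (not_lt.1 h1)
        by_cases h3 : a.2 < b.2 <;> simp [h3, Prod.Lex.lt_iff, heq]
  simp only [PySem.List.sorted2, hpred, Bool.false_eq_true, if_false]

theorem pv_sorted2_kv_eq_of (xs ys : List (String × String))
    (hp : ys.Perm xs)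
    (hs : ys.Pairwise (fun a b => toLex (a.2, a.1) < toLex (b.2, b.1))) :
    PySem.List.sorted2 xs (fun kv => kv.2) (fun kv => kv.1) = ys := by
  have key := PySem.List.sorted_eq_of_perm_of_pairwise_lt (κ := Lex (String × String))
      xs ys (fun kv => toLex (kv.2, kv.1)) hp hs
  rw [← key, PySem.List.sorted_eq_foldl_insertBy]
  have hpred : (fun (a b : String × String) => decide (a.2 < b.2) || (!decide (b.2 < a.2) && decide (a.1 < b.1)))
      = (fun (a b : String × String) => decide (toLex ((fun kv : String × String => kv.2) a, (fun kv : String × String => kv.1) a) < toLex ((fun kv : String × String => kv.2) b, (fun kv : String × String => kv.1) b))) := by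
    funext a b
    by_cases h1 : a.2 < b.2
    · simp [h1, Prod.Lex.lt_iff]
    · by_cases h2 : b.2 < a.2
      · have hne : ¬ a.2 = b.2 := fun h => absurd (h ▸ h2) (lt_irrefl _)
        simp [h1, h2, Prod.Lex.lt_iff, hne]
      · have heq : a.2 = b.2 := le_antisymm (not_lt.1 h2) (not_lt.1 h1)
        by_cases h3 : a.1 < b.1 <;> simp [h3, Prod.Lex.lt_iff, heq]
  simp only [PySem.List.sorted2, hpred, Bool.false_eq_true, if_false]

theorem pv_groups_getD (l : List (String × String)) (r : String) :
    (l.foldl (fun g p => g.modify p.2 [] (fun ms => ms ++ [p.1])) PySem.Dict.empty).getD r []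
      = pvMems l r := by
  have h := PySem.Dict.getD_foldl_modify_append (l := l.map (fun p => (p.2, p.1)))
      (d := PySem.Dict.empty) (c := r)
  rw [List.foldl_map] at h
  simpa [pvMems, List.filter_map, Function.comp_def] using h

theorem pv_groups_keys (l : List (String × String)) :
    (l.foldl (fun g p => g.modify p.2 [] (fun ms => ms ++ [p.1])) PySem.Dict.empty).keys
      = PySem.Set.ofList (l.map (fun p => p.2)) := by
  have h := PySem.Dict.keys_foldl_modify_key (l := l) (key := fun p => p.2) (d0 := ([] : List String))
      (f := fun _ p => fun ms => ms ++ [p.1]) (d := PySem.Dict.empty)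
  simpa [PySem.Set.update, PySem.Set.ofList_eq_foldl] using h

theorem pv_groups_keys_nodup (l : List (String × String)) :
    (l.foldl (fun g p => g.modify p.2 [] (fun ms => ms ++ [p.1])) PySem.Dict.empty).keys.Nodup :=
  PySem.Dict.nodup_keys_foldl_modify_key l (fun p => p.2) [] (fun _ p => fun ms => ms ++ [p.1])
    PySem.Dict.empty (by simp)

theorem pv_mems_ne_nil (l : List (String × String)) (r : String)
    (h : r ∈ l.map (fun p => p.2)) : pvMems l r ≠ [] := by
  simp only [List.mem_map] at h
  obtain ⟨p, hp, he⟩ := h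
  simp only [pvMems, ne_eq, List.map_eq_nil_iff, List.filter_eq_nil_iff, not_forall]
  exact ⟨p, hp, by simp [he]⟩

theorem pv_mems_nodup (l : List (String × String))
    (hnd : (l.map (fun p => p.1)).Nodup) (r : String) : (pvMems l r).Nodup := by
  rw [pvMems]
  exact hnd.sublist ((List.filter_sublist (l := l)).map (fun p => p.1))

theorem pv_smems_pairwise_lt (l : List (String × String))
    (hnd : (l.map (fun p => p.1)).Nodup) (r : String) :
    (pvSMems l r).Pairwise (fun a b => a < b) := by
  have hle := PySem.List.sorted_pairwise (pvMems l r) (fun m => m)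
  have hnd2 : (pvSMems l r).Nodup :=
    (PySem.List.sorted_perm (pvMems l r) (fun m => m) false).nodup_iff.mpr (pv_mems_nodup l hnd r)
  exact (hle.and hnd2).imp (fun h => lt_of_le_of_ne h.1 h.2)

theorem pv_sreps_pairwise_lt (l : List (String × String)) :
    (pvSReps l).Pairwise (fun a b => a < b) :=
  PySem.List.sorted_ofList_pairwise_lt _

theorem pv_mem_sreps (l : List (String × String)) (r : String) :
    r ∈ pvSReps l ↔ r ∈ l.map (fun p => p.2) := by
  rw [pvSReps, PySem.List.mem_sorted, PySem.Set.mem_ofList]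

theorem pv_fmt_eq (ms : List String) (hne : ms ≠ []) :
    (if ms.length > 1
     then "{" ++ PySem.Str.join ", " (PySem.List.sorted ms (fun m => m)) ++ "}"
     else (PySem.List.pyGet? ms 0).getD "")
    = pvFmt (PySem.List.sorted ms (fun m => m)) := by
  rw [pvFmt, PySem.List.length_sorted]
  by_cases h : ms.length > 1
  · simp [h]
  · obtain ⟨x, rfl⟩ : ∃ x, ms = [x] := by
      match ms, hne, h with
      | [x], _, _ => exact ⟨x, rfl⟩
      | (x :: y :: t), _, h => simp at h
    rfl

theorem pvA_eq (l : List (String × String)) (_hnd : (l.map (fun p => p.1)).Nodup) :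
    describe_alias_groups_py l = pvTarget l := by
  have hitems : (l.foldl (fun g p => g.modify p.2 [] (fun ms => ms ++ [p.1])) PySem.Dict.empty).items
      = (PySem.Set.ofList (l.map (fun p => p.2))).map (fun r => (r, pvMems l r)) := by
    rw [PySem.Dict.items_eq_map_keys _ (pv_groups_keys_nodup l) [], pv_groups_keys]
    exact List.map_congr_left (fun r _ => by rw [pv_groups_getD])
  have hsorted : PySem.List.sorted2
        ((l.foldl (fun g p => g.modify p.2 [] (fun ms => ms ++ [p.1])) PySem.Dict.empty).items)
        (fun rm => rm.1) (fun rm => rm.2)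
      = (pvSReps l).map (fun r => (r, pvMems l r)) := by
    have hperm : ((pvSReps l).map (fun r => (r, pvMems l r))).Perm
        ((l.foldl (fun g p => g.modify p.2 [] (fun ms => ms ++ [p.1])) PySem.Dict.empty).items) := by
      rw [hitems]
      exact (PySem.List.sorted_perm _ _ false).map _
    have hpair : ((pvSReps l).map (fun r => (r, pvMems l r))).Pairwise
        (fun a b => toLex (a.1, a.2) < toLex (b.1, b.2)) := by
      rw [List.pairwise_map]
      exact (pv_sreps_pairwise_lt l).imp (fun h => Prod.Lex.lt_iff.mpr (Or.inl h))
    exact pv_sorted2_pairs_eq_of _ _ hperm hpair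
  simp only [describe_alias_groups_py]
  rw [hsorted, PySem.List.foldl_append_singleton_eq_map, List.nil_append, List.map_map, pvTarget]
  apply congrArg
  apply List.map_congr_left
  intro r hr
  have hne : pvMems l r ≠ [] := pv_mems_ne_nil l r ((pv_mem_sreps l r).mp hr)
  simpa [Function.comp_def, pvSMems] using pv_fmt_eq (pvMems l r) hne

-- a Nodup list of representatives covering l splits l into its filter blocks, up to permutation
theorem pv_cover_perm (rs : List String) (l : List (String × String))
    (hnd : rs.Nodup) (hcov : ∀ p ∈ l, p.2 ∈ rs) :
    (rs.flatMap (fun r => l.filter (fun p => p.2 == r))).Perm l := by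
  induction rs generalizing l with
  | nil =>
    have : l = [] := List.eq_nil_iff_forall_not_mem.mpr (fun p hp => by simpa using hcov p hp)
    simp [this]
  | cons r rs' ih =>
    rw [List.flatMap_cons]
    have htail : rs'.flatMap (fun r' => l.filter (fun p => p.2 == r'))
        = rs'.flatMap (fun r' => (l.filter (fun p => !(p.2 == r))).filter (fun p => p.2 == r')) := by
      apply List.flatMap_congr
      intro r' hr'
      rw [List.filter_filter]
      apply List.filter_congr
      intro p _
      by_cases hp : p.2 = r'
      · have hne2 : r' ≠ r := fun h => (List.nodup_cons.1 hnd).1 (h ▸ hr')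
        simp [hp, hne2]
      · simp [hp]
    rw [htail]
    have hcov' : ∀ p ∈ l.filter (fun p => !(p.2 == r)), p.2 ∈ rs' := by
      intro p hp
      have h1 := (List.mem_filter.1 hp).2
      have h2 := hcov p (List.mem_filter.1 hp).1
      simp only [Bool.not_eq_eq_eq_not, Bool.not_true, beq_eq_false_iff_ne, ne_eq] at h1
      exact (List.mem_cons.1 h2).elim (fun h => absurd h h1) id
    have hperm := ih (l.filter (fun p => !(p.2 == r))) (List.nodup_cons.1 hnd).2 hcov'
    exact ((hperm.append_left (l.filter (fun p => p.2 == r))).trans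
      (List.filter_append_perm (fun p => p.2 == r) l))

-- B's sort by (rep, inp) is the sorted representatives' blocks of sorted members, concatenated
theorem pvB_sorted2_eq (l : List (String × String)) (hnd : (l.map (fun p => p.1)).Nodup) :
    PySem.List.sorted2 l (fun kv => kv.2) (fun kv => kv.1)
      = (pvSReps l).flatMap (fun r => (pvSMems l r).map (fun m => (m, r))) := by
  have hsrnd : (pvSReps l).Nodup := (pv_sreps_pairwise_lt l).imp ne_of_lt
  apply pv_sorted2_kv_eq_of
  · have h1 : ∀ r ∈ pvSReps l,
        ((pvSMems l r).map (fun m => (m, r))).Perm (l.filter (fun p => p.2 == r)) := by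
      intro r _
      have hperm : (pvSMems l r).Perm (pvMems l r) := PySem.List.sorted_perm _ _ false
      have heq : (pvMems l r).map (fun m => (m, r)) = l.filter (fun p => p.2 == r) := by
        rw [pvMems, List.map_map]
        conv_rhs => rw [← List.map_id (l.filter (fun p => p.2 == r))]
        apply List.map_congr_left
        intro p hp
        have h2 : p.2 = r := by simpa using (List.mem_filter.1 hp).2
        simp [← h2]
      exact heq ▸ hperm.map _
    have hcov : ∀ p ∈ l, p.2 ∈ pvSReps l := by
      intro p hp
      exact (pv_mem_sreps l p.2).mpr (List.mem_map.2 ⟨p, hp, rfl⟩)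
    exact (List.Perm.flatMap_left (pvSReps l) h1).trans (pv_cover_perm (pvSReps l) l hsrnd hcov)
  · rw [List.pairwise_flatMap]
    constructor
    · intro r _
      rw [List.pairwise_map]
      refine List.Pairwise.imp ?_ (pv_smems_pairwise_lt l hnd r)
      intro a b h
      exact Prod.Lex.lt_iff.mpr (Or.inr ⟨rfl, h⟩)
    · refine (pv_sreps_pairwise_lt l).imp ?_
      intro r1 r2 h12 x hx y hy
      obtain ⟨mx, _, rfl⟩ := List.mem_map.1 hx
      obtain ⟨my, _, rfl⟩ := List.mem_map.1 hy
      exact Prod.Lex.lt_iff.mpr (Or.inl h12)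

theorem pv_altRun_flat (rs : List String) (f : String → List String)
    (hne : ∀ r ∈ rs, f r ≠ []) (hnd : rs.Nodup) :
    altRun (rs.flatMap (fun r => (f r).map (fun m => (m, r)))) = rs.map (fun r => pvFmt (f r)) := by
  induction rs with
  | nil => simp [altRun]
  | cons r rs' ih =>
    obtain ⟨m, ms, hfr⟩ : ∃ m ms, f r = m :: ms := by
      cases h : f r with
      | nil => exact absurd h (hne r (by simp))
      | cons a t => exact ⟨a, t, rfl⟩
    have hrest : ∀ q ∈ rs'.flatMap (fun r' => (f r').map (fun m => (m, r'))), ((q : String × String).2 == r) = false := by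
      intro q hq
      rw [List.mem_flatMap] at hq
      obtain ⟨r', hr', hq'⟩ := hq
      rw [List.mem_map] at hq'
      obtain ⟨m', _, rfl⟩ := hq'
      simp only [beq_eq_false_iff_ne, ne_eq]
      intro h; exact (List.nodup_cons.1 hnd).1 (h ▸ hr')
    have htw : (ms.map (fun m => (m, r)) ++ rs'.flatMap (fun r' => (f r').map (fun m => (m, r')))).takeWhile (fun q => q.2 == r)
        = ms.map (fun m => (m, r)) := by
      rw [List.takeWhile_append]
      have h1 : (ms.map (fun m => (m, r))).takeWhile (fun q => q.2 == r) = ms.map (fun m => (m, r)) := by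
        rw [List.takeWhile_eq_self_iff]
        intro q hq; rw [List.mem_map] at hq; obtain ⟨m', _, rfl⟩ := hq; simp
      rw [h1, if_pos rfl]
      have h2 : (rs'.flatMap (fun r' => (f r').map (fun m => (m, r')))).takeWhile (fun q => q.2 == r) = [] := by
        rw [List.takeWhile_eq_nil_iff]
        intro hl
        simpa using hrest _ (List.get_mem _ ⟨0, hl⟩)
      rw [h2, List.append_nil]
    have hdw : (ms.map (fun m => (m, r)) ++ rs'.flatMap (fun r' => (f r').map (fun m => (m, r')))).dropWhile (fun q => q.2 == r)
        = rs'.flatMap (fun r' => (f r').map (fun m => (m, r'))) := by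
      rw [List.dropWhile_append]
      have h1 : (ms.map (fun m => (m, r))).dropWhile (fun q => q.2 == r) = [] := by
        rw [List.dropWhile_eq_nil_iff]
        intro q hq; rw [List.mem_map] at hq; obtain ⟨m', _, rfl⟩ := hq; simp
      rw [h1]
      simp only [List.isEmpty_nil, if_pos]
      rw [List.dropWhile_eq_self_iff]
      intro hl
      simpa using hrest _ (List.getElem_mem hl)
    rw [List.flatMap_cons, hfr, List.map_cons, List.cons_append, altRun, htw, hdw,
        ih (fun r' h => hne r' (by simp [h])) (List.nodup_cons.1 hnd).2]
    simp only [List.map_cons, List.map_map, Function.comp_def, List.map_id']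
    rw [pvFmt, hfr]

theorem pvB_eq (l : List (String × String)) (hnd : (l.map (fun p => p.1)).Nodup) :
    describe_alias_groups_py_alt l = pvTarget l := by
  have hne : ∀ r ∈ pvSReps l, pvSMems l r ≠ [] := by
    intro r hr
    rw [pvSMems, ne_eq, PySem.List.sorted_eq_nil_iff]
    exact pv_mems_ne_nil l r ((pv_mem_sreps l r).mp hr)
  have hsrnd : (pvSReps l).Nodup := (pv_sreps_pairwise_lt l).imp ne_of_lt
  rw [describe_alias_groups_py_alt, pvB_sorted2_eq l hnd,
      pv_altRun_flat (pvSReps l) (pvSMems l) hne hsrnd, pvTarget]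

-- ===== VERDICT (by name: the statement is the Claim_ definition above) =====
theorem describe_alias_groups_py_spec : Claim_equal_describe_alias_groups_py := by
  intro assignment _ hpre
  unfold Spec_describe_alias_groups_py
  rw [pvA_eq assignment hpre, pvB_eq assignment hpre]
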